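-- pv_equiv track=rewrite | github.com/ZyyeDev/bloxon-server | avatar_service.py | fix_obj_mtl_path
-- ===== SOURCE A (Python) =====
-- def fix_obj_mtl_path(obj_content: str, mtl_filename: str) -> str:
--     lines = obj_content.split('\n')
--     updated_lines = []
--
--     for line in lines:
--         if line.strip().startswith('mtllib'):
--             updated_lines.append(f"mtllib {mtl_filename}")
--         else:
--             updated_lines.append(line)
--
--     return '\n'.join(updated_lines)
-- ===== SOURCE B (Python) =====
-- import re
--
-- _MTLLIB_LINE = re.compile(r'^[^\S\n]*mtllib.*$', re.MULTILINE)
--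
-- def fix_obj_mtl_path(obj_content: str, mtl_filename: str) -> str:
--     return _MTLLIB_LINE.sub(lambda m: "mtllib " + mtl_filename, obj_content)
-- ===== Notes on version B (the rewrite author's own statement) =====
-- stated objective: idiomatic
-- what changed: Replaces the explicit split('\n')/loop/append/join pipeline with a single precompiled re.sub over the whole string using a MULTILINE-anchored pattern r'^[^\S\n]*mtllib.*$' and a lambda replacement, letting the regex engine do the per-line traversal.
import Mathlib
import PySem

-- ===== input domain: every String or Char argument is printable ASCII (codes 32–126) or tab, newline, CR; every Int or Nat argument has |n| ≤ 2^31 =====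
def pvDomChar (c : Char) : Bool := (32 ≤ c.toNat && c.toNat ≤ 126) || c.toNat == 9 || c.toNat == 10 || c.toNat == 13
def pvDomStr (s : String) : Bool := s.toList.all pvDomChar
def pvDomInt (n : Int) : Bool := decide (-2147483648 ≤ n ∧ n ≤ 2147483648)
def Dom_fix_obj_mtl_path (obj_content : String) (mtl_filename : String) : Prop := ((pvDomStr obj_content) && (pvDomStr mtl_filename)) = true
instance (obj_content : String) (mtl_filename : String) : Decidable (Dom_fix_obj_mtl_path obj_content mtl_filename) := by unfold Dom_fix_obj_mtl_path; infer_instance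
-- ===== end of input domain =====

-- B replaces A's split/loop/join with a single anchored regex substitution over the whole string (objective: idiomatic).

-- ===== PORT A =====
def fix_obj_mtl_path (obj_content : String) (mtl_filename : String) : String :=
  -- obj_content.split('\n'): sep ≠ "" so split? is always `some`
  let lines := (PySem.Str.split? obj_content "\n").getD []
  let updated_lines := lines.foldl (fun acc line =>
    if PySem.Str.startswith (PySem.Str.strip line) "mtllib"
    then acc ++ ["mtllib " ++ mtl_filename]
    else acc ++ [line]) []
  PySem.Str.join "\n" updated_lines

-- ===== PORT B =====
-- the regex character class [^\S\n]: whitespace other than '\n'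
def pvWsNoNl (c : Char) : Bool := PySem.Chars.isspace c && !(c == '\n')

-- whether the regex r'^[^\S\n]*mtllib.*$' matches at a line start
def pvMtlMatch (line : List Char) : Bool :=
  PySem.Chars.startswith (line.dropWhile pvWsNoNl) ['m','t','l','l','i','b']

-- hand-port of re.sub(_MTLLIB_LINE, lambda m: "mtllib " + mtl_filename, obj_content) with
-- re.MULTILINE: exact for this anchored pattern — one left-to-right scan that at each line
-- start tests the match; a match consumes the whole line (".*$" runs to the next '\n')
def pvRegexSub (repl : List Char) (cs : List Char) : List Char :=
  match h : cs.dropWhile (fun c => !(c == '\n')) with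
  | [] => if pvMtlMatch (cs.takeWhile (fun c => !(c == '\n'))) then repl
          else cs.takeWhile (fun c => !(c == '\n'))
  | _ :: rest' =>
      (if pvMtlMatch (cs.takeWhile (fun c => !(c == '\n'))) then repl
       else cs.takeWhile (fun c => !(c == '\n'))) ++ '\n' :: pvRegexSub repl rest'
termination_by cs.length
decreasing_by
  have h1 := List.length_dropWhile_le (fun c => !(c == '\n')) cs
  rw [h] at h1; simp at h1; omega

def fix_obj_mtl_path_alt (obj_content : String) (mtl_filename : String) : String :=
  String.ofList (pvRegexSub ("mtllib ".toList ++ mtl_filename.toList) obj_content.toList)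

-- ===== PRECONDITION & SPEC =====
def Spec_fix_obj_mtl_path (obj_content : String) (mtl_filename : String) (out : String) : Prop := out = fix_obj_mtl_path_alt obj_content mtl_filename
instance (obj_content : String) (mtl_filename : String) (out : String) : Decidable (Spec_fix_obj_mtl_path obj_content mtl_filename out) := by unfold Spec_fix_obj_mtl_path; infer_instance

-- ===== CLAIM (what is proved, stated in full; the proofs are below) =====
def Claim_equal_fix_obj_mtl_path : Prop := ∀ (obj_content : String) (mtl_filename : String), Dom_fix_obj_mtl_path obj_content mtl_filename → Spec_fix_obj_mtl_path obj_content mtl_filename (fix_obj_mtl_path obj_content mtl_filename)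

-- ===== LEMMAS AND PROOFS =====

def pvSpl (cs : List Char) : List (List Char) :=
  match h : cs.dropWhile (fun c => !(c == '\n')) with
  | [] => [cs.takeWhile (fun c => !(c == '\n'))]
  | _ :: r => cs.takeWhile (fun c => !(c == '\n')) :: pvSpl r
termination_by cs.length
decreasing_by
  have h1 := List.length_dropWhile_le (fun c => !(c == '\n')) cs
  rw [h] at h1; simp at h1; omega

def pvPre (x : List Char) : List (List Char) → List (List Char)
  | [] => []
  | h :: t => (x ++ h) :: t

theorem pvPre_nil (xs : List (List Char)) : pvPre [] xs = xs := by
  cases xs <;> simp [pvPre]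

theorem pvSpl_cons_nl (rest : List Char) : pvSpl ('\n' :: rest) = [] :: pvSpl rest := by
  rw [pvSpl]
  split
  · next heq => simp at heq
  · next heq =>
      simp only [List.dropWhile_cons] at heq
      simp at heq
      simp [heq.2]

theorem pvSpl_cons_ne (c : Char) (rest : List Char) (hc : c ≠ '\n') :
    pvSpl (c :: rest) = pvPre [c] (pvSpl rest) := by
  rw [pvSpl, pvSpl]
  split
  · next heq =>
      simp only [List.dropWhile_cons, show (!(c == '\n')) = true by simp [hc], if_true] at heq
      split
      · next heq2 => simp [List.takeWhile_cons, hc, pvPre]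
      · next heq2 => rw [heq] at heq2; simp at heq2
  · next r heq =>
      simp only [List.dropWhile_cons, show (!(c == '\n')) = true by simp [hc], if_true] at heq
      split
      · next heq2 => rw [heq] at heq2; simp at heq2
      · next r2 heq2 =>
          rw [heq] at heq2
          cases heq2
          simp [List.takeWhile_cons, hc, pvPre]

theorem pvGo_eq (fuel : Nat) : ∀ (l cur : List Char) (acc : List (List Char)),
    l.length < fuel →
    PySem.Chars.splitOn.go ['\n'] fuel l cur acc = acc.reverse ++ pvPre cur.reverse (pvSpl l) := by
  induction fuel with
  | zero => intro l cur acc h; omega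
  | succ f ih =>
    intro l cur acc h
    cases l with
    | nil =>
      rw [PySem.Chars.splitOn.go]
      · rw [pvSpl]; simp [pvPre]
      · omega
    | cons c rest =>
      rw [PySem.Chars.splitOn.go]
      by_cases hc : c = '\n'
      · subst hc
        simp only [List.isPrefixOf, BEq.rfl, Bool.true_and, List.isPrefixOf_nil_left, if_true]
        rw [ih _ _ _ (by simpa using Nat.lt_of_succ_lt_succ h), pvSpl_cons_nl]
        simp only [List.length_cons, List.drop_succ_cons, List.drop_zero, List.reverse_nil,
          pvPre_nil]
        simp [pvPre]
      · have : ['\n'].isPrefixOf (c :: rest) = false := by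
          simp [List.isPrefixOf]; exact fun hh => (hc hh.symm).elim
        rw [this]
        simp only [if_false, Bool.false_eq_true]
        rw [ih _ _ _ (by simpa using Nat.lt_of_succ_lt_succ h)]
        rw [pvSpl_cons_ne c rest hc]
        cases hs : pvSpl rest <;> simp [pvPre]
theorem splitOn_eq (l : List Char) : PySem.Chars.splitOn l ['\n'] = pvSpl l := by
  unfold PySem.Chars.splitOn
  rw [pvGo_eq _ l [] [] (by omega)]
  simp [pvPre_nil]

theorem pvDropWhile_ws_no_nl (l : List Char) (h : '\n' ∉ l) :
    l.dropWhile PySem.Chars.isspace = l.dropWhile pvWsNoNl := by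
  induction l with
  | nil => rfl
  | cons a t ih =>
    have ha : a ≠ '\n' := fun hh => h (hh ▸ List.mem_cons_self)
    have hb : (a == '\n') = false := beq_eq_false_iff_ne.mpr ha
    simp only [List.dropWhile_cons, pvWsNoNl, hb, Bool.not_false, Bool.and_true]
    split
    · exact ih (fun hm => h (List.mem_cons_of_mem _ hm))
    · rfl

theorem pvPrefix_rstrip_iff (x p : List Char) (hp : p ≠ [])
    (hws : ∀ c ∈ p, PySem.Chars.isspace c = false) :
    p <+: PySem.Chars.rstrip x ↔ p <+: x := by
  constructor
  · intro hpr
    refine hpr.trans ?_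
    unfold PySem.Chars.rstrip
    have := List.dropWhile_suffix (l := x.reverse) PySem.Chars.isspace
    rw [← List.reverse_prefix] at this
    simpa using this
  · rintro ⟨t, rfl⟩
    unfold PySem.Chars.rstrip
    rw [List.reverse_append, List.dropWhile_append]
    have hdp : List.dropWhile PySem.Chars.isspace p.reverse = p.reverse := by
      cases hpv : p.reverse with
      | nil => simp
      | cons c r =>
        have hc : c ∈ p := by
          have : c ∈ p.reverse := by rw [hpv]; exact List.mem_cons_self
          simpa using this
        simp [List.dropWhile_cons, hws c hc]
    split
    · next he =>
        rw [hdp]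
        simp
    · next he =>
        rw [List.reverse_append, List.reverse_reverse]
        exact ⟨_, rfl⟩

theorem pvStartswith_strip (l : List Char) (h : '\n' ∉ l) :
    PySem.Chars.startswith (PySem.Chars.strip l) ['m','t','l','l','i','b'] = pvMtlMatch l := by
  have hws : ∀ c ∈ (['m','t','l','l','i','b'] : List Char), PySem.Chars.isspace c = false := by
    intro c hc; fin_cases hc <;> rfl
  unfold PySem.Chars.strip PySem.Chars.lstrip pvMtlMatch
  rw [pvDropWhile_ws_no_nl l h]
  unfold PySem.Chars.startswith
  rw [Bool.eq_iff_iff, List.isPrefixOf_iff_prefix, List.isPrefixOf_iff_prefix]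
  exact pvPrefix_rstrip_iff _ _ (by simp) hws

theorem pvNoNl_takeWhile (cs : List Char) :
    '\n' ∉ cs.takeWhile (fun c => !(c == '\n')) := by
  intro hm
  have := List.mem_takeWhile_imp hm
  simp at this

theorem pvJoin_map_spl (repl : List Char) (cs : List Char) :
    PySem.Chars.join ['\n'] ((pvSpl cs).map (fun line =>
      if PySem.Chars.startswith (PySem.Chars.strip line) ['m','t','l','l','i','b'] then repl
      else line)) = pvRegexSub repl cs := by
  induction cs using pvSpl.induct with
  | case1 cs hdrop =>
    rw [pvSpl, pvRegexSub]
    split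
    · next he =>
        rw [List.map_cons, List.map_nil, PySem.Chars.join_singleton,
          pvStartswith_strip _ (pvNoNl_takeWhile cs)]
    · next he => rw [hdrop] at he; simp at he
  | case2 cs c r hdrop ih =>
    rw [pvSpl, pvRegexSub]
    split
    · next he => rw [hdrop] at he; simp at he
    · next c2 r2 he =>
        rw [hdrop] at he
        cases he
        cases hs : pvSpl r with
        | nil =>
          exfalso
          have : pvSpl r ≠ [] := by
            rw [pvSpl]; split <;> simp
          exact this hs
        | cons q t =>
          rw [hs] at ih
          rw [List.map_cons, List.map_cons, PySem.Chars.join_cons_cons,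
            pvStartswith_strip _ (pvNoNl_takeWhile cs)]
          rw [List.map_cons] at ih
          rw [ih]
          simp

theorem pvFoldl_if_append {α β : Type} (p : α → Bool) (b : β) (g : α → β) (l : List α)
    (acc : List β) :
    l.foldl (fun acc x => if p x then acc ++ [b] else acc ++ [g x]) acc =
      acc ++ l.map (fun x => if p x then b else g x) := by
  induction l generalizing acc with
  | nil => simp
  | cons a t ih =>
    simp only [List.foldl_cons, List.map_cons]
    by_cases hp : p a = true
    · rw [if_pos hp, ih, if_pos hp]; simp
    · rw [if_neg hp, ih, if_neg hp]; simp

theorem pvMain_eq (o m : String) : fix_obj_mtl_path o m = fix_obj_mtl_path_alt o m := by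
  unfold fix_obj_mtl_path fix_obj_mtl_path_alt
  have hsplit : PySem.Str.split? o "\n" =
      some ((pvSpl o.toList).map String.ofList) := by
    unfold PySem.Str.split? PySem.Chars.split?
    have : ("\n" : String).toList = ['\n'] := by decide
    rw [this]
    simp [splitOn_eq]
  rw [hsplit]
  simp only [Option.getD_some]
  rw [pvFoldl_if_append]
  simp only [List.nil_append]
  rw [List.map_map]
  unfold PySem.Str.join
  congr 1
  rw [List.map_map]
  have hmap : (List.map (String.toList ∘ (fun x =>
      if PySem.Str.startswith (PySem.Str.strip x) "mtllib" = true then "mtllib " ++ m else x) ∘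
      String.ofList) (pvSpl o.toList)) =
      (pvSpl o.toList).map (fun line =>
        if PySem.Chars.startswith (PySem.Chars.strip line) ['m','t','l','l','i','b'] = true
        then ("mtllib ".toList ++ m.toList) else line) := by
    apply List.map_congr_left
    intro l _
    simp only [Function.comp_apply]
    have hsw : PySem.Str.startswith (PySem.Str.strip (String.ofList l)) "mtllib" =
        PySem.Chars.startswith (PySem.Chars.strip l) ['m','t','l','l','i','b'] := by
      unfold PySem.Str.startswith PySem.Str.strip
      have h1 : ("mtllib" : String).toList = ['m','t','l','l','i','b'] := by decide
      simp only [String.toList_ofList, h1]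
    rw [hsw]
    split
    · simp
    · rw [String.toList_ofList]
  rw [hmap]
  have hsep : ("\n" : String).toList = ['\n'] := by decide
  rw [hsep, pvJoin_map_spl]

-- ===== VERDICT (by name: the statement is the Claim_ definition above) =====
theorem fix_obj_mtl_path_spec : Claim_equal_fix_obj_mtl_path := by
  intro obj_content mtl_filename _
  unfold Spec_fix_obj_mtl_path
  exact pvMain_eq obj_content mtl_filename
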